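-- pv_equiv track=rewrite | github.com/junhg0211/boj | python/9/1049.py | brand_price
-- ===== SOURCE A (Python) =====
-- def brand_price(number, six_price, one_price):
--     price = 0
--
--     while number >= 6:
--         price += min(six_price, one_price * 6)
--         number -= 6
--         continue
--
--     price += min(six_price, one_price * number)
--
--     return price
-- ===== SOURCE B (Python) =====
-- def brand_price(number, six_price, one_price):
--     if number < 6:
--         return min(six_price, one_price * number)
--     q, r = divmod(number, 6)
--     bundle = min(six_price, 6 * one_price)
--     return q * bundle + min(six_price, one_price * r)
-- ===== Notes on version B (the rewrite author's own statement) =====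
-- stated objective: faster
-- what changed: Replaces the subtract-6-per-iteration loop with closed-form arithmetic: quotient-times-bundle-cost plus the remainder's min, via one divmod.
import Mathlib
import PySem

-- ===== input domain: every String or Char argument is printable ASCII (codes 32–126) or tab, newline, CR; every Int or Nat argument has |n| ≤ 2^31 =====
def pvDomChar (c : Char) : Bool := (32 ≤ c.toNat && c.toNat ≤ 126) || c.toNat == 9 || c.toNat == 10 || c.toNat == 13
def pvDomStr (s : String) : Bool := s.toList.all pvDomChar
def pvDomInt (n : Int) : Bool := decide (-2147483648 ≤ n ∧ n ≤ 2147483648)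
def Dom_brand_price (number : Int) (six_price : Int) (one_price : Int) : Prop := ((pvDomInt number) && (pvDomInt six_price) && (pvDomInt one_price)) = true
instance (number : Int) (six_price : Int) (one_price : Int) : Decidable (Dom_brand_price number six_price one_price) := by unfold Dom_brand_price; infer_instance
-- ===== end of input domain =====

-- B replaces A's subtract-6-per-iteration loop by closed-form divmod arithmetic (objective: faster).

-- ===== PORT A =====
-- the while-loop of A: state is (number, price); ends by adding min(six, one*number)
def brandLoopA (number price six_price one_price : Int) : Int :=
  if h : 6 ≤ number then
    brandLoopA (number - 6) (price + min six_price (one_price * 6)) six_price one_price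
  else
    price + min six_price (one_price * number)
termination_by number.toNat
decreasing_by omega

def brand_price (number : Int) (six_price : Int) (one_price : Int) : Int :=
  brandLoopA number 0 six_price one_price

-- ===== PORT B =====
def brand_price_alt (number : Int) (six_price : Int) (one_price : Int) : Int :=
  if number < 6 then
    min six_price (one_price * number)
  else
    let q := PySem.Int.floordiv number 6
    let r := PySem.Int.mod number 6
    let bundle := min six_price (6 * one_price)
    q * bundle + min six_price (one_price * r)

-- ===== PRECONDITION & SPEC =====
def Spec_brand_price (number : Int) (six_price : Int) (one_price : Int) (out : Int) : Prop := out = brand_price_alt number six_price one_price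
instance (number : Int) (six_price : Int) (one_price : Int) (out : Int) : Decidable (Spec_brand_price number six_price one_price out) := by unfold Spec_brand_price; infer_instance

-- ===== CLAIM (what is proved, stated in full; the proofs are below) =====
def Claim_equal_brand_price : Prop := ∀ (number : Int) (six_price : Int) (one_price : Int), Dom_brand_price number six_price one_price → Spec_brand_price number six_price one_price (brand_price number six_price one_price)

-- ===== LEMMAS AND PROOFS =====

-- peeling one bundle off B's closed form
theorem alt_step (n s o : Int) (h : 6 ≤ n) :
    brand_price_alt n s o = min s (o * 6) + brand_price_alt (n - 6) s o := by
  unfold brand_price_alt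
  rw [if_neg (by omega), PySem.Int.floordiv_eq_ediv_of_pos (by norm_num),
      PySem.Int.mod_eq_emod_of_pos (by norm_num)]
  have h6 : (6 : Int) * o = o * 6 := by ring
  by_cases h2 : n - 6 < 6
  · rw [if_pos h2]
    have e1 : n / 6 = 1 := by omega
    have e2 : n % 6 = n - 6 := by omega
    rw [e1, e2, h6]
    simp
  · rw [if_neg h2, PySem.Int.floordiv_eq_ediv_of_pos (by norm_num),
        PySem.Int.mod_eq_emod_of_pos (by norm_num)]
    have e1 : (n - 6) / 6 = n / 6 - 1 := by omega
    have e2 : (n - 6) % 6 = n % 6 := by omega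
    rw [e1, e2, h6]
    show n / 6 * min s (o * 6) + min s (o * (n % 6)) =
      min s (o * 6) + ((n / 6 - 1) * min s (o * 6) + min s (o * (n % 6)))
    ring

theorem loop_eq (s o : Int) : ∀ (k : Nat) (n price : Int), n.toNat ≤ k →
    brandLoopA n price s o = price + brand_price_alt n s o := by
  intro k
  induction k with
  | zero =>
    intro n price hk
    have hn : ¬ 6 ≤ n := by omega
    rw [brandLoopA, dif_neg hn]
    unfold brand_price_alt
    rw [if_pos (by omega)]
  | succ k ih =>
    intro n price hk
    by_cases h : 6 ≤ n
    · rw [brandLoopA, dif_pos h, ih (n - 6) _ (by omega), alt_step n s o h]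
      ring
    · rw [brandLoopA, dif_neg h]
      unfold brand_price_alt
      rw [if_pos (by omega)]

-- ===== VERDICT (by name: the statement is the Claim_ definition above) =====
theorem brand_price_spec : Claim_equal_brand_price := by
  intro number six_price one_price _
  unfold Spec_brand_price brand_price
  rw [loop_eq six_price one_price number.toNat number 0 le_rfl, zero_add]
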